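-- pv_equiv track=rewrite | github.com/felixleopold/kbai | Assignment 2 Diagnose This/Python/hittingsets.py | get_minimal_hitting_sets
-- ===== SOURCE A (Python) =====
-- def get_minimal_hitting_sets(hitting_sets: list[list[str]]) -> list[list[str]]:
--     """
--     Filter hitting sets to only include minimal hitting sets.
--     A minimal hitting set is one that has no strict subset that is also a hitting set.
--
--     Parameters:
--     hitting_sets: List of all hitting sets
--
--     Returns:
--     List of minimal hitting sets (supersets and duplicates removed)
--     """
--     # Remove duplicates first
--     seen = set()
--     unique_hitting_sets = []
--     for hitting_set in hitting_sets:
--         key = tuple(sorted(hitting_set))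
--         if key not in seen:
--             seen.add(key)
--             unique_hitting_sets.append(hitting_set)
--
--     # Filter to minimal hitting sets (remove supersets)
--     minimal_hitting_sets = []
--     for hitting_set in unique_hitting_sets:
--         is_minimal = True
--         hitting_set_set = set(hitting_set)
--
--         # Check if any other hitting set is a strict subset
--         for others in unique_hitting_sets:
--             others_set = set(others)
--             if others_set < hitting_set_set:  # Strict subset
--                 is_minimal = False
--                 break
--
--         if is_minimal:
--             minimal_hitting_sets.append(hitting_set)
--
--     return minimal_hitting_sets
-- ===== SOURCE B (Python) =====
-- def get_minimal_hitting_sets(hitting_sets: list[list[str]]) -> list[list[str]]: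
--     """Dedupe by sorted-tuple key, then scan unique sets in ascending set-size
--     order keeping a set iff no already-kept set is a strict subset of it;
--     finally restore the original order via the remembered indices."""
--     uniq = {}
--     for index, hitting_set in enumerate(hitting_sets):
--         key = tuple(sorted(hitting_set))
--         if key not in uniq:
--             uniq[key] = (index, hitting_set)
--     entries = sorted(uniq.values(), key=lambda entry: len(set(entry[1])))
--     kept = []
--     for index, hitting_set in entries:
--         member = set(hitting_set)
--         if all(not (set(other) < member) for _, other in kept):
--             kept.append((index, hitting_set))
--     kept.sort(key=lambda entry: entry[0])
--     return [hitting_set for _, hitting_set in kept]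
-- ===== Notes on version B (the rewrite author's own statement) =====
-- stated objective: faster
-- what changed: B sorts the deduplicated sets by distinct-element count and sweeps once, testing each set only against the already-kept minimal sets (instead of A's scan of every unique set for every unique set), then restores the original order via remembered indices.
import Mathlib
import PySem

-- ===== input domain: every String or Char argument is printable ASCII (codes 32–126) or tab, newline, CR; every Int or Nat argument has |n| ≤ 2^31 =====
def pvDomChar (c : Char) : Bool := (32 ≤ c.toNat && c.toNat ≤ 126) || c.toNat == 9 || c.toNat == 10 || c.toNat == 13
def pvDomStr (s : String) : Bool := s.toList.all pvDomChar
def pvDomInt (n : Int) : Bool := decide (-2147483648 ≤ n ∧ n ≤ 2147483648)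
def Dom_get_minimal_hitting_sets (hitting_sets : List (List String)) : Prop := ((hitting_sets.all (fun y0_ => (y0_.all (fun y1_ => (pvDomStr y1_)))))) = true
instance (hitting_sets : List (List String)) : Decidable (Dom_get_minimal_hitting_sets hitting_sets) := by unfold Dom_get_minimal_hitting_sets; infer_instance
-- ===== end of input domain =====

-- B replaces A's all-pairs strict-subset scan over the unique sets by a size-ascending sweep
-- that compares each set only against the already-kept minimal sets, restoring input order at the end.

-- ===== PORT A =====
-- Python's `set(o) < set(h)` (strict subset), the comparison both sources perform
def pyStrictSubset (a b : PySem.Set String) : Bool :=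
  PySem.Set.issubset a b && !(PySem.Set.issubset b a)

def get_minimal_hitting_sets (hitting_sets : List (List String)) : List (List String) :=
  let st := hitting_sets.foldl
    (fun (st : PySem.Set (List String) × List (List String)) hitting_set =>
      let key := PySem.List.sorted hitting_set (fun x => x) false
      if PySem.Set.contains st.1 key then st
      else (PySem.Set.add st.1 key, st.2 ++ [hitting_set]))
    (PySem.Set.empty, [])
  let unique_hitting_sets := st.2
  unique_hitting_sets.foldl
    (fun acc hitting_set =>
      let hitting_set_set := PySem.Set.ofList hitting_set
      -- `for others in …: if set(others) < hitting_set_set: … break` = any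
      let is_minimal := !(unique_hitting_sets.any
        (fun others => pyStrictSubset (PySem.Set.ofList others) hitting_set_set))
      if is_minimal then acc ++ [hitting_set] else acc) []

-- ===== PORT B =====
def get_minimal_hitting_sets_alt (hitting_sets : List (List String)) : List (List String) :=
  let uniq := (PySem.List.enumerate hitting_sets 0).foldl
    (fun (d : PySem.Dict (List String) (Int × List String)) p =>
      let key := PySem.List.sorted p.2 (fun x => x) false
      if PySem.Dict.contains d key then d else PySem.Dict.insert d key p)
    PySem.Dict.empty
  let entries := PySem.List.sorted (PySem.Dict.values uniq)
    (fun e => PySem.Set.len (PySem.Set.ofList e.2)) false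
  let kept := entries.foldl
    (fun (kept : List (Int × List String)) e =>
      let member := PySem.Set.ofList e.2
      if kept.all (fun o => !(pyStrictSubset (PySem.Set.ofList o.2) member))
      then kept ++ [e] else kept) []
  let kept2 := PySem.List.sorted kept (fun e => e.1) false
  kept2.map (fun e => e.2)

-- ===== PRECONDITION & SPEC =====
def Spec_get_minimal_hitting_sets (hitting_sets : List (List String)) (out : List (List String)) : Prop := out = get_minimal_hitting_sets_alt hitting_sets
instance (hitting_sets : List (List String)) (out : List (List String)) : Decidable (Spec_get_minimal_hitting_sets hitting_sets out) := by unfold Spec_get_minimal_hitting_sets; infer_instance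

-- ===== CLAIM (what is proved, stated in full; the proofs are below) =====
def Claim_equal_get_minimal_hitting_sets : Prop := ∀ (hitting_sets : List (List String)), Dom_get_minimal_hitting_sets hitting_sets → Spec_get_minimal_hitting_sets hitting_sets (get_minimal_hitting_sets hitting_sets)

-- ===== LEMMAS AND PROOFS =====

-- key and strict-subset abbreviations used by the proofs
def hsKey (h : List String) : List String := PySem.List.sorted h (fun x => x) false
def ssub (a b : List String) : Bool := pyStrictSubset (PySem.Set.ofList a) (PySem.Set.ofList b)
def minb (U : List (List String)) (h : List String) : Bool := !(U.any fun o => ssub o h)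

-- the common dedup-by-sorted-key result, as structural recursion (seen = plain key list)
def dedRef : List (List String) → List (List String) → List (List String)
  | [], _ => []
  | h :: t, seen => if hsKey h ∈ seen then dedRef t seen else h :: dedRef t (seen ++ [hsKey h])

-- same, for B's (index, set) pairs
def dedRefP : List (Int × List String) → List (List String) → List (Int × List String)
  | [], _ => []
  | p :: t, seen => if hsKey p.2 ∈ seen then dedRefP t seen else p :: dedRefP t (seen ++ [hsKey p.2])

theorem A_fold (l : List (List String)) (seen : PySem.Set (List String)) (acc : List (List String)) :
    (l.foldl (fun (st : PySem.Set (List String) × List (List String)) hitting_set =>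
      let key := PySem.List.sorted hitting_set (fun x => x) false
      if PySem.Set.contains st.1 key then st
      else (PySem.Set.add st.1 key, st.2 ++ [hitting_set])) (seen, acc)).2 = acc ++ dedRef l seen := by
  induction l generalizing seen acc with
  | nil => simp [dedRef]
  | cons h t ih =>
    by_cases hm : hsKey h ∈ seen
    · have hc : PySem.Set.contains seen (PySem.List.sorted h (fun x => x) false) = true :=
        (PySem.Set.contains_iff _ _).mpr hm
      simp only [List.foldl_cons, hc, if_true, ih, dedRef, hm]
    · have hc : PySem.Set.contains seen (PySem.List.sorted h (fun x => x) false) = false := by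
        rw [← Bool.not_eq_true, PySem.Set.contains_iff]; exact hm
      simp only [List.foldl_cons, hc, Bool.false_eq_true, if_false, ih, dedRef, hm]
      rw [show seen.add (PySem.List.sorted h (fun x => x) false) = seen ++ [hsKey h] from
        PySem.Set.add_of_not_mem hm]
      simp

theorem B_dict (l : List (Int × List String)) (d : PySem.Dict (List String) (Int × List String)) :
    (l.foldl (fun (d : PySem.Dict (List String) (Int × List String)) p =>
      let key := PySem.List.sorted p.2 (fun x => x) false
      if PySem.Dict.contains d key then d else PySem.Dict.insert d key p) d).values
    = d.values ++ dedRefP l d.keys := by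
  induction l generalizing d with
  | nil => simp [dedRefP]
  | cons p t ih =>
    by_cases hm : hsKey p.2 ∈ d.keys
    · have hc : PySem.Dict.contains d (PySem.List.sorted p.2 (fun x => x) false) = true :=
        (PySem.Dict.contains_iff_mem_keys _ _).mpr hm
      simp only [List.foldl_cons, hc, if_true, ih, dedRefP, hm]
    · have hc : PySem.Dict.contains d (PySem.List.sorted p.2 (fun x => x) false) = false := by
        rw [← Bool.not_eq_true, PySem.Dict.contains_iff_mem_keys]; exact hm
      simp only [List.foldl_cons, hc, Bool.false_eq_true, if_false, ih, dedRefP, hm]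
      rw [PySem.Dict.keys_insert_of_not_contains _ _ hc]
      simp [PySem.Dict.values, PySem.Dict.items_insert_of_not_contains _ _ hc, hsKey]

theorem dedRefP_snd (l : List (List String)) (i : Int) (seen : List (List String)) :
    (dedRefP (PySem.List.enumerate l i) seen).map (fun e => e.2) = dedRef l seen := by
  induction l generalizing i seen with
  | nil => simp [PySem.List.enumerate_nil, dedRefP, dedRef]
  | cons h t ih =>
    rw [PySem.List.enumerate_cons]
    by_cases hm : hsKey h ∈ seen <;> simp [dedRefP, dedRef, hm, ih]

theorem dedRefP_sublist (l : List (Int × List String)) (seen : List (List String)) :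
    (dedRefP l seen).Sublist l := by
  induction l generalizing seen with
  | nil => simp [dedRefP]
  | cons p t ih =>
    by_cases hm : hsKey p.2 ∈ seen
    · simpa [dedRefP, hm] using List.Sublist.cons p (ih seen)
    · simpa [dedRefP, hm] using List.Sublist.cons₂ p (ih (seen ++ [hsKey p.2]))

theorem ssub_iff (a b : List String) :
    ssub a b = true ↔ ((∀ x ∈ a, x ∈ b) ∧ ¬ (∀ x ∈ b, x ∈ a)) := by
  unfold ssub pyStrictSubset
  simp only [Bool.and_eq_true, Bool.not_eq_true', Bool.eq_false_iff, Ne,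
    PySem.Set.issubset_iff, PySem.Set.mem_ofList]

theorem ssub_size (a b : List String) (h : ssub a b = true) :
    (PySem.Set.ofList a).length < (PySem.Set.ofList b).length := by
  obtain ⟨hsub, hns⟩ := (ssub_iff a b).mp h
  push Not at hns
  obtain ⟨y, hyb, hya⟩ := hns
  rw [← List.toFinset_card_of_nodup (PySem.Set.nodup_ofList a),
      ← List.toFinset_card_of_nodup (PySem.Set.nodup_ofList b)]
  apply Finset.card_lt_card
  constructor
  · intro x hx
    simp only [List.mem_toFinset, PySem.Set.mem_ofList] at hx ⊢
    exact hsub x hx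
  · intro hcon
    have : y ∈ (PySem.Set.ofList b).toFinset := by
      simp [List.mem_toFinset, PySem.Set.mem_ofList, hyb]
    have := hcon this
    simp [List.mem_toFinset, PySem.Set.mem_ofList] at this
    exact hya this

theorem ssub_trans (a b c : List String) (h1 : ssub a b = true) (h2 : ssub b c = true) :
    ssub a c = true := by
  obtain ⟨hab, hnba⟩ := (ssub_iff a b).mp h1
  obtain ⟨hbc, hncb⟩ := (ssub_iff b c).mp h2
  refine (ssub_iff a c).mpr ⟨fun x hx => hbc x (hab x hx), fun hca => hncb (fun x hx => hab x (hca x hx))⟩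

theorem minb_iff (U : List (List String)) (h : List String) :
    minb U h = true ↔ ∀ o ∈ U, ¬ ssub o h = true := by
  simp [minb]

theorem exists_minimal (U : List (List String)) (x : List String)
    (h : ∃ u ∈ U, ssub u x = true) :
    ∃ m ∈ U, ssub m x = true ∧ minb U m = true := by
  suffices aux : ∀ (n : Nat) (x : List String), (PySem.Set.ofList x).length ≤ n →
      (∃ u ∈ U, ssub u x = true) → ∃ m ∈ U, ssub m x = true ∧ minb U m = true from
    aux _ x le_rfl h
  intro n
  induction n with
  | zero =>
    rintro x hx ⟨u, hu, hsx⟩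
    have := ssub_size u x hsx
    omega
  | succ n ih =>
    rintro x hx ⟨u, hu, hsx⟩
    by_cases hm : minb U u = true
    · exact ⟨u, hu, hsx, hm⟩
    · have hex : ∃ v ∈ U, ssub v u = true := by
        by_contra hcon
        push Not at hcon
        exact hm ((minb_iff U u).mpr (by simpa using hcon))
      have hsz := ssub_size u x hsx
      obtain ⟨m, hmU, hmu, hmin⟩ := ih u (by omega) hex
      exact ⟨m, hmU, ssub_trans m u x hmu hsx, hmin⟩

theorem keptLoop (U : List (List String)) (entries : List (Int × List String))
    (hpw : entries.Pairwise (fun a b => PySem.Set.len (PySem.Set.ofList a.2) ≤ PySem.Set.len (PySem.Set.ofList b.2)))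
    (hmem : ∀ q ∈ entries, q.2 ∈ U)
    (hcov : ∀ u ∈ U, ∃ q ∈ entries, q.2 = u) :
    ∀ (rest done : List (Int × List String)), entries = done ++ rest →
    rest.foldl (fun (kept : List (Int × List String)) e =>
        if kept.all (fun o => !(pyStrictSubset (PySem.Set.ofList o.2) (PySem.Set.ofList e.2))) then kept ++ [e] else kept)
      (done.filter (fun e => minb U e.2))
    = entries.filter (fun e => minb U e.2) := by
  simp only [show ∀ (a b : List String),
    pyStrictSubset (PySem.Set.ofList a) (PySem.Set.ofList b) = ssub a b from fun _ _ => rfl]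
  intro rest
  induction rest with
  | nil =>
    intro done hsplit
    simp only [List.append_nil] at hsplit
    simp [hsplit]
  | cons e rest' ih =>
    intro done hsplit
    have hcond : (done.filter (fun e' => minb U e'.2)).all (fun o => !(ssub o.2 e.2)) = minb U e.2 := by
      by_cases hF : minb U e.2 = true
      · rw [hF, List.all_eq_true]
        intro o ho
        have hoU : o.2 ∈ U := hmem o (by rw [hsplit]; exact List.mem_append_left _ (List.mem_of_mem_filter ho))
        have := (minb_iff U e.2).mp hF o.2 hoU
        simp [this]
      · have hex : ∃ u ∈ U, ssub u e.2 = true := by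
          by_contra hcon
          push Not at hcon
          exact hF ((minb_iff U e.2).mpr (by simpa using hcon))
        obtain ⟨m, hmU, hme, hmin⟩ := exists_minimal U e.2 hex
        obtain ⟨q, hq, hqm⟩ := hcov m hmU
        have hsz := ssub_size m e.2 hme
        have hqdone : q ∈ done := by
          rw [hsplit] at hq
          rcases List.mem_append.mp hq with h1 | h2
          · exact h1
          · rcases List.mem_cons.mp h2 with h3 | h4
            · exfalso; rw [h3] at hqm; rw [hqm] at hsz; omega
            · exfalso
              rw [hsplit] at hpw
              have hrel := List.rel_of_pairwise_cons (List.pairwise_append.mp hpw).2.1 h4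
              have := hrel
              have hlen : ∀ s : PySem.Set String, PySem.Set.len s = (s.length : Int) := by
                intro s; simp [PySem.Set.len]
              rw [hlen, hlen, hqm] at this
              omega
        rw [Bool.eq_false_iff.mpr hF]
        apply List.all_eq_false.mpr
        refine ⟨q, List.mem_filter.mpr ⟨hqdone, by rw [hqm]; exact hmin⟩, ?_⟩
        rw [hqm]
        simp [hme]
    simp only [List.foldl_cons, hcond]
    by_cases hF : minb U e.2 = true
    · rw [hF, if_pos rfl]
      have hstep : done.filter (fun e' => minb U e'.2) ++ [e] = (done ++ [e]).filter (fun e' => minb U e'.2) := by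
        simp [List.filter_append, hF]
      rw [hstep]
      exact ih (done ++ [e]) (by simp [hsplit])
    · rw [Bool.eq_false_iff.mpr hF]
      simp only [Bool.false_eq_true, if_false]
      have hstep : done.filter (fun e' => minb U e'.2) = (done ++ [e]).filter (fun e' => minb U e'.2) := by
        simp [List.filter_append, Bool.eq_false_iff.mpr hF]
      rw [hstep]
      exact ih (done ++ [e]) (by simp [hsplit])

theorem map_snd_filter (l : List (Int × List String)) (p : List String → Bool) :
    (l.filter (fun e => p e.2)).map (fun e => e.2) = (l.map (fun e => e.2)).filter p := by
  induction l with
  | nil => rfl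
  | cons x t ih => by_cases h : p x.2 <;> simp [h, ih]

-- ===== VERDICT (by name: the statement is the Claim_ definition above) =====
theorem get_minimal_hitting_sets_spec : Claim_equal_get_minimal_hitting_sets := by
  intro l _
  unfold Spec_get_minimal_hitting_sets
  have hA : get_minimal_hitting_sets l = (dedRef l []).filter (fun e => minb (dedRef l []) e) := by
    simp only [get_minimal_hitting_sets]
    rw [A_fold l PySem.Set.empty [], List.nil_append]
    rw [PySem.List.foldl_append_if
      (fun hitting_set => !(List.any (dedRef l PySem.Set.empty) fun others =>
        pyStrictSubset (PySem.Set.ofList others) (PySem.Set.ofList hitting_set)))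
      (fun x => x) (dedRef l PySem.Set.empty) []]
    simp only [List.nil_append, List.map_id']
    rfl
  have hsnd := dedRefP_snd l 0 []
  have hB : get_minimal_hitting_sets_alt l = (dedRef l []).filter (fun e => minb (dedRef l []) e) := by
    simp only [get_minimal_hitting_sets_alt]
    rw [B_dict (PySem.List.enumerate l 0) PySem.Dict.empty]
    have hv : (PySem.Dict.empty : PySem.Dict (List String) (Int × List String)).values = [] := rfl
    have hk : (PySem.Dict.empty : PySem.Dict (List String) (Int × List String)).keys = [] := rfl
    rw [hv, hk, List.nil_append]
    have hperm := PySem.List.sorted_perm (dedRefP (PySem.List.enumerate l 0) [])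
      (fun e => PySem.Set.len (PySem.Set.ofList e.2)) false
    have hpw := PySem.List.sorted_pairwise (dedRefP (PySem.List.enumerate l 0) [])
      (fun e => PySem.Set.len (PySem.Set.ofList e.2))
    have hmem : ∀ q ∈ PySem.List.sorted (dedRefP (PySem.List.enumerate l 0) [])
        (fun e => PySem.Set.len (PySem.Set.ofList e.2)) false, q.2 ∈ dedRef l [] := by
      intro q hq
      rw [← hsnd]
      exact List.mem_map_of_mem (hperm.mem_iff.mp hq)
    have hcov : ∀ u ∈ dedRef l [], ∃ q ∈ PySem.List.sorted (dedRefP (PySem.List.enumerate l 0) [])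
        (fun e => PySem.Set.len (PySem.Set.ofList e.2)) false, q.2 = u := by
      intro u hu
      rw [← hsnd] at hu
      obtain ⟨q, hq, hq2⟩ := List.mem_map.mp hu
      exact ⟨q, hperm.mem_iff.mpr hq, hq2⟩
    have hkept := keptLoop (dedRef l [])
      (PySem.List.sorted (dedRefP (PySem.List.enumerate l 0) [])
        (fun e => PySem.Set.len (PySem.Set.ofList e.2)) false)
      hpw hmem hcov
      (PySem.List.sorted (dedRefP (PySem.List.enumerate l 0) [])
        (fun e => PySem.Set.len (PySem.Set.ofList e.2)) false) [] rfl
    simp only [List.filter_nil] at hkept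
    rw [hkept]
    have hpermf := hperm.filter (fun e => minb (dedRef l []) e.2)
    have hpwf := List.Pairwise.filter (R := fun (a b : Int × List String) => a.1 < b.1)
      (fun e => minb (dedRef l []) e.2)
      (List.Pairwise.sublist (dedRefP_sublist (PySem.List.enumerate l 0) [])
        (PySem.List.pairwise_lt_enumerate l 0))
    rw [PySem.List.sorted_eq_of_perm_of_pairwise_lt
      (List.filter (fun e => minb (dedRef l []) e.2)
        (PySem.List.sorted (dedRefP (PySem.List.enumerate l 0) [])
          (fun e => PySem.Set.len (PySem.Set.ofList e.2)) false))
      (List.filter (fun e => minb (dedRef l []) e.2) (dedRefP (PySem.List.enumerate l 0) []))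
      (fun e => e.1) hpermf.symm hpwf]
    rw [map_snd_filter, hsnd]
  exact hA.trans hB.symm
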